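-- pv_equiv track=rewrite | github.com/X1aoLian/OWSS | source/metric.py | depthmin
-- ===== SOURCE A (Python) =====
-- def depthmin(x,n,depth):
--     if depth > 2:
--         return depth
--     else:
--         if n[x] != 0:
--             return depth
--         else:
--             depth += 1
--             return depthmin(int(n[x]),n, depth)
-- ===== SOURCE B (Python) =====
-- def depthmin(x, n, depth):
--     # Closed form: after the first step the index is always 0 (since n[x] == 0);
--     # the whole recursion collapses to at most two list reads.
--     if depth > 2:
--         return depth
--     if n[x] != 0:
--         return depth
--     if depth == 2 or n[0] != 0:
--         return depth + 1
--     return 3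
-- ===== Notes on version B (the rewrite author's own statement) =====
-- stated objective: simpler
-- what changed: Replaced the self-recursion by a closed form: since the recursive call always passes index int(n[x]) = 0, the result is determined by n[x], n[0] and depth alone, with no loop or recursion.
import Mathlib
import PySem

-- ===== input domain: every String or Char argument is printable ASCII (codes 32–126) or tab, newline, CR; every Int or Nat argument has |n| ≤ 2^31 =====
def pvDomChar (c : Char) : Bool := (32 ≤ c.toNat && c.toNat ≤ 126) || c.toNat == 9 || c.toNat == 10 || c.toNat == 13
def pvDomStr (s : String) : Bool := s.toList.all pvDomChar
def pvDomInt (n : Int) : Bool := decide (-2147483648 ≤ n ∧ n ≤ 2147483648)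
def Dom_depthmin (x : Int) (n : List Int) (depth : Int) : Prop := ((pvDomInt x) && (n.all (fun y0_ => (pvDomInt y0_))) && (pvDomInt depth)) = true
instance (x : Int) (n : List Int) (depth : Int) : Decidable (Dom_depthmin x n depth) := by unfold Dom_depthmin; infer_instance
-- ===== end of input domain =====

-- B replaces A's self-recursion by a closed form (the recursive call always passes index 0): simpler, no recursion.

-- ===== PORT A =====
-- literal port of A's recursion; `none` from pyGet? is Python's IndexError, excluded by Pre_
def depthmin (x : Int) (n : List Int) (depth : Int) : Int :=
  if depth > 2 then depth
  else
    match PySem.List.pyGet? n x with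
    | none => 0          -- IndexError in Python; outside Pre_
    | some v =>
      if v ≠ 0 then depth
      else depthmin v n (depth + 1)
termination_by (3 - depth).toNat
decreasing_by
  simp only [not_lt] at *
  omega

-- ===== PORT B =====
def depthmin_alt (x : Int) (n : List Int) (depth : Int) : Int :=
  if depth > 2 then depth
  else
    match PySem.List.pyGet? n x with
    | none => 0          -- IndexError in Python; outside Pre_
    | some v =>
      if v ≠ 0 then depth
      else if depth = 2 then depth + 1      -- short-circuit `depth == 2 or n[0] != 0`
      else
        match PySem.List.pyGet? n 0 with
        | none => 0      -- unreachable under Pre_ (n is nonempty here)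
        | some w => if w ≠ 0 then depth + 1 else 3

-- ===== PRECONDITION & SPEC =====
-- Pre_ excludes exactly the inputs where A raises IndexError: depth ≤ 2 with x out of range.
def Pre_depthmin (x : Int) (n : List Int) (depth : Int) : Prop :=
  depth > 2 ∨ PySem.Raise.InRange n.length x
instance (x : Int) (n : List Int) (depth : Int) : Decidable (Pre_depthmin x n depth) := by
  unfold Pre_depthmin; infer_instance
def pvWitness_depthmin : Int × List Int × Int := (0, [0, 1], 0)

def Spec_depthmin (x : Int) (n : List Int) (depth : Int) (out : Int) : Prop := out = depthmin_alt x n depth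
instance (x : Int) (n : List Int) (depth : Int) (out : Int) : Decidable (Spec_depthmin x n depth out) := by unfold Spec_depthmin; infer_instance

-- ===== CLAIM (what is proved, stated in full; the proofs are below) =====
def Claim_equal_depthmin : Prop := ∀ (x : Int) (n : List Int) (depth : Int), Dom_depthmin x n depth → Pre_depthmin x n depth → Spec_depthmin x n depth (depthmin x n depth)

-- ===== LEMMAS AND PROOFS =====

-- When n[0] = 0 and depth ≤ 2, A keeps recursing at index 0 until depth reaches 3.
theorem depthmin_zero_loop (n : List Int) (h0 : PySem.List.pyGet? n 0 = some 0) :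
    ∀ (depth : Int), depth ≤ 3 → depthmin 0 n depth = 3 := by
  intro depth
  induction hk : (4 - depth).toNat generalizing depth with
  | zero => intro h; omega
  | succ k ih =>
    intro h
    rw [depthmin]
    by_cases hd : depth > 2
    · simp only [hd, if_true]; omega
    · simp only [hd, if_false, h0]
      simp only [ne_eq, not_true_eq_false, if_false]
      exact ih (depth + 1) (by omega) (by omega)

theorem depthmin_spec : Claim_equal_depthmin := by
  intro x n depth _ hpre
  unfold Spec_depthmin depthmin_alt
  rw [depthmin]
  by_cases hd : depth > 2
  · simp [hd]
  · simp only [hd, if_false]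
    have hx : PySem.Raise.InRange n.length x := by
      rcases hpre with h | h
      · omega
      · exact h
    obtain ⟨v, hv⟩ : ∃ v, PySem.List.pyGet? n x = some v := by
      cases hvv : PySem.List.pyGet? n x with
      | none => exact absurd hx ((PySem.List.pyGet?_eq_none_iff _ _).mp hvv)
      | some v => exact ⟨v, rfl⟩
    rw [hv]
    by_cases hvz : v = 0
    · subst hvz
      simp only [ne_eq, not_true_eq_false, if_false]
      -- n is nonempty (index x is in range), so n[0] exists
      have hnn : n ≠ [] := by
        intro h; subst h
        simp [PySem.Raise.InRange] at hx
        omega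
      obtain ⟨w, hw⟩ : ∃ w, PySem.List.pyGet? n 0 = some w := by
        cases n with
        | nil => exact absurd rfl hnn
        | cons a t => exact ⟨a, by simp⟩
      rw [depthmin]
      by_cases h2 : depth = 2
      · subst h2; norm_num
      · simp only [show ¬ (depth + 1 > 2) from by omega, if_false, hw, h2, if_false]
        by_cases hwz : w = 0
        · subst hwz
          simp only [ne_eq, not_true_eq_false, if_false]
          exact depthmin_zero_loop n hw (depth + 1 + 1) (by omega) ▸ rfl
        · simp [hwz]
    · simp [hvz]
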